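-- pv_equiv track=rewrite | github.com/hyeeun1031/coding-practice | 프로그래머스/1/468370. 중요한 단어를 스포 방지/중요한 단어를 스포 방지.py | solution
-- ===== SOURCE A (Python) =====
-- def solution(message, spoiler_ranges):
--     n = len(message)
--     m = len(spoiler_ranges)
--
--     # 각 문자에 어떤 spoiler 구간이 적용됐는지 기록
--     cover = [-1] * n
--     for idx, (s, e) in enumerate(spoiler_ranges):
--         for i in range(s, e + 1):
--             cover[i] = idx
--
--     # plain_words: 스포가 전혀 없는 위치에서 등장한 단어들
--     plain_words = set()
--
--     # revealed_at[i]: i번째 클릭 때 완전히 공개되는 단어들(왼쪽->오른쪽 순서 유지)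
--     revealed_at = [[] for _ in range(m)]
--
--     # message를 단어 단위로 파싱
--     i = 0
--     while i < n:
--         if message[i] == ' ':
--             i += 1
--             continue
--
--         start = i
--         while i < n and message[i] != ' ':
--             i += 1
--         end = i - 1
--
--         word = message[start:i]
--
--         # 이 단어가 어떤 spoiler 구간에 걸쳐 있는지 확인
--         last_idx = -1
--         for p in range(start, end + 1):
--             if cover[p] != -1:
--                 last_idx = max(last_idx, cover[p])
--
--         if last_idx == -1:
--             # 한 번도 스포 구간에 안 걸린 단어
--             plain_words.add(word)
--         else:
--             # 마지막 spoiler 구간이 클릭될 때 완전히 공개됨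
--             revealed_at[last_idx].append(word)
--
--     # 클릭 순서대로 중요한 단어 판별
--     seen_spoiler_words = set()
--     answer = 0
--
--     for idx in range(m):
--         for word in revealed_at[idx]:
--             if word not in plain_words and word not in seen_spoiler_words:
--                 answer += 1
--             # 공개된 스포 단어는 중요 여부와 무관하게 이후 중복 체크 대상
--             seen_spoiler_words.add(word)
--
--     return answer
-- ===== SOURCE B (Python) =====
-- def solution(message, spoiler_ranges):
--     # Classify each word occurrence by direct interval intersection (no per-position
--     # cover array), then count with a single set difference (no buckets / two-phase scan).
--     plain = set()
--     covered = set()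
--     n = len(message)
--     i = 0
--     while i < n:
--         if message[i] == ' ':
--             i += 1
--             continue
--         start = i
--         while i < n and message[i] != ' ':
--             i += 1
--         word = message[start:i]
--         if any(max(s, start) <= min(e, i - 1) for s, e in spoiler_ranges):
--             covered.add(word)
--         else:
--             plain.add(word)
--     return len(covered - plain)
-- ===== Notes on version B (the rewrite author's own statement) =====
-- stated objective: alternative
-- what changed: Replaces A's per-position cover-array fill plus two-phase bucket/seen counting by a direct interval-intersection test per word occurrence and a single set difference covered-plain.
-- outside the precondition, e.g. on solution('ab', [(-1, -1)]): A returns 1, B returns 0; on solution('ab cd', [(-2, 1)]): A returns 2, B returns 1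
import Mathlib
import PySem

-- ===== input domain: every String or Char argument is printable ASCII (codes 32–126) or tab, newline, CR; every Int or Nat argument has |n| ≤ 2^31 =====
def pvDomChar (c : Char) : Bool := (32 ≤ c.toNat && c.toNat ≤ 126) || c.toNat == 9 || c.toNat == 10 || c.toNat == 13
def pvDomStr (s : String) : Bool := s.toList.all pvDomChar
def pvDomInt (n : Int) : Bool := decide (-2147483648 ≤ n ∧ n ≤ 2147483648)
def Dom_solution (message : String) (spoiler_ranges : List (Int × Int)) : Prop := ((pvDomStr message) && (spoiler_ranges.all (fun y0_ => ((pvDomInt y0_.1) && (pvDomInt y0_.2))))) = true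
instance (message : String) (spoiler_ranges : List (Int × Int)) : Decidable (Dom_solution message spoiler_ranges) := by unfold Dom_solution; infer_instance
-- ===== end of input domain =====

-- B replaces A's per-position cover-array fill and two-phase bucket/seen counting by a
-- direct interval-intersection test per word and one set difference (alternative algorithm,
-- similar cost; equivalence of the RETURN value is proved on Pre_).

-- ===== PORT A =====
-- inner 'while i < n and message[i] != ' ': i += 1' (textually identical in A and B);
-- fuel is a pure totality guard (call sites pass enough for the scan to finish)
def wordEnd (msg : List Char) : Nat → Nat → Nat
  | 0, i => i
  | fuel + 1, i =>
    if h : i < msg.length then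
      if msg[i] ≠ ' ' then wordEnd msg fuel (i + 1) else i
    else i

-- 'while i < n' of A, carrying A's state (plain_words, revealed_at)
def loopA (msg : List Char) (cover : List Int) :
    Nat → Nat → PySem.Set String → List (List String) →
    PySem.Set String × List (List String)
  | 0, _, plain, revealed => (plain, revealed)
  | fuel + 1, i, plain, revealed =>
    if h : i < msg.length then
      if msg[i] = ' ' then
        loopA msg cover fuel (i + 1) plain revealed
      else
        let j := wordEnd msg (fuel + 1) i
        let word : String := String.ofList (PySem.List.slice msg (some (i : Int)) (some (j : Int)))
        let last : Int := (PySem.List.pyRange (i : Int) (((j : Int) - 1) + 1) 1).foldl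
          (fun acc p =>
            if PySem.List.pyGetD cover p (-1) ≠ -1 then max acc (PySem.List.pyGetD cover p (-1))
            else acc) (-1)
        if last = -1 then
          loopA msg cover fuel j (PySem.Set.add plain word) revealed
        else
          loopA msg cover fuel j plain
            (PySem.List.pySetD revealed last (PySem.List.pyGetD revealed last [] ++ [word]))
    else (plain, revealed)

-- cover = [-1]*n then 'for idx, (s, e) in enumerate(...): for i in range(s, e+1): cover[i] = idx'
def buildCover (n : Nat) (spoiler_ranges : List (Int × Int)) : List Int :=
  (PySem.List.enumerate spoiler_ranges 0).foldl
    (fun c pr =>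
      (PySem.List.pyRange pr.2.1 (pr.2.2 + 1) 1).foldl
        (fun c i => PySem.List.pySetD c i pr.1) c)
    (List.replicate n (-1))

def solution (message : String) (spoiler_ranges : List (Int × Int)) : Int :=
  let msg := message.toList
  let m := spoiler_ranges.length
  let cover := buildCover msg.length spoiler_ranges
  let res := loopA msg cover msg.length 0 PySem.Set.empty (List.replicate m ([] : List String))
  ((PySem.List.pyRange 0 (m : Int) 1).foldl
    (fun st idx =>
      (PySem.List.pyGetD res.2 idx []).foldl
        (fun st word =>
          (if word ∉ res.1 ∧ word ∉ st.2 then st.1 + 1 else st.1, PySem.Set.add st.2 word))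
        st)
    ((0 : Int), (PySem.Set.empty : PySem.Set String))).1

-- ===== PORT B =====
-- B's single pass: classify each word by interval intersection into covered/plain sets
def loopB (msg : List Char) (spoiler_ranges : List (Int × Int)) :
    Nat → Nat → PySem.Set String → PySem.Set String →
    PySem.Set String × PySem.Set String
  | 0, _, plain, covered => (plain, covered)
  | fuel + 1, i, plain, covered =>
    if h : i < msg.length then
      if msg[i] = ' ' then
        loopB msg spoiler_ranges fuel (i + 1) plain covered
      else
        let j := wordEnd msg (fuel + 1) i
        let word : String := String.ofList (PySem.List.slice msg (some (i : Int)) (some (j : Int)))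
        if spoiler_ranges.any (fun se => max se.1 (i : Int) ≤ min se.2 ((j : Int) - 1)) then
          loopB msg spoiler_ranges fuel j plain (PySem.Set.add covered word)
        else
          loopB msg spoiler_ranges fuel j (PySem.Set.add plain word) covered
    else (plain, covered)

def solution_alt (message : String) (spoiler_ranges : List (Int × Int)) : Int :=
  let msg := message.toList
  let res := loopB msg spoiler_ranges msg.length 0 PySem.Set.empty PySem.Set.empty
  PySem.Set.len (PySem.Set.diff res.2 res.1)

-- ===== PRECONDITION & SPEC =====
-- Pre_ excludes inputs with a nonempty spoiler range not within [0, len(message)):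
-- there A either raises IndexError or writes through Python's negative-index wraparound —
-- malformed range input outside the task's natural domain (B treats such a range as
-- covering only the positions it names).
def Pre_solution (message : String) (spoiler_ranges : List (Int × Int)) : Prop :=
  ∀ se ∈ spoiler_ranges, se.1 ≤ se.2 → 0 ≤ se.1 ∧ se.2 < (message.length : Int)

instance (message : String) (spoiler_ranges : List (Int × Int)) :
    Decidable (Pre_solution message spoiler_ranges) := by unfold Pre_solution; infer_instance

def pvWitness_solution : String × (List (Int × Int)) := ("spoiler alert", [(0, 6)])

def Spec_solution (message : String) (spoiler_ranges : List (Int × Int)) (out : Int) : Prop :=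
  out = solution_alt message spoiler_ranges
instance (message : String) (spoiler_ranges : List (Int × Int)) (out : Int) :
    Decidable (Spec_solution message spoiler_ranges out) := by unfold Spec_solution; infer_instance

-- ===== CLAIM (what is proved, stated in full; the proofs are below) =====
def Claim_equal_solution : Prop := ∀ (message : String) (spoiler_ranges : List (Int × Int)), Dom_solution message spoiler_ranges → Pre_solution message spoiler_ranges → Spec_solution message spoiler_ranges (solution message spoiler_ranges)


-- ===== LEMMAS AND PROOFS =====

theorem le_wordEnd (msg : List Char) (fuel i : Nat) : i ≤ wordEnd msg fuel i := by
  induction fuel generalizing i with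
  | zero => simp [wordEnd]
  | succ fuel ih =>
    simp only [wordEnd]
    split
    · split
      · exact le_trans (by omega) (ih (i + 1))
      · exact le_refl i
    · exact le_refl i

theorem wordEnd_le (msg : List Char) (fuel i : Nat) (h : i ≤ msg.length) :
    wordEnd msg fuel i ≤ msg.length := by
  induction fuel generalizing i with
  | zero => simpa [wordEnd]
  | succ fuel ih =>
    simp only [wordEnd]
    split
    · split
      · exact ih (i + 1) (by omega)
      · exact h
    · exact h

theorem lt_wordEnd (msg : List Char) (fuel i : Nat) (h : i < msg.length)
    (hne : msg[i] ≠ ' ') : i < wordEnd msg (fuel + 1) i := by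
  simp only [wordEnd, dif_pos h, ne_eq, hne, not_false_eq_true, if_pos]
  have := le_wordEnd msg fuel (i + 1); omega


-- The word occurrences of msg from index i, as (start, end-exclusive) spans
def wordsFrom (msg : List Char) : Nat → Nat → List (Nat × Nat)
  | 0, _ => []
  | fuel + 1, i =>
    if h : i < msg.length then
      if msg[i] = ' ' then wordsFrom msg fuel (i + 1)
      else (i, wordEnd msg (fuel + 1) i) :: wordsFrom msg fuel (wordEnd msg (fuel + 1) i)
    else []

def wordOf (msg : List Char) (p : Nat × Nat) : String :=
  String.ofList (PySem.List.slice msg (some (p.1 : Int)) (some (p.2 : Int)))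

def lastOf (cover : List Int) (p : Nat × Nat) : Int :=
  (PySem.List.pyRange (p.1 : Int) (((p.2 : Int) - 1) + 1) 1).foldl
    (fun acc q =>
      if PySem.List.pyGetD cover q (-1) ≠ -1 then max acc (PySem.List.pyGetD cover q (-1))
      else acc) (-1)

def covOf (rs : List (Int × Int)) (p : Nat × Nat) : Bool :=
  rs.any (fun se => max se.1 (p.1 : Int) ≤ min se.2 ((p.2 : Int) - 1))

theorem mem_wordsFrom_bounds (msg : List Char) (fuel i : Nat) :
    ∀ p ∈ wordsFrom msg fuel i, i ≤ p.1 ∧ p.1 < p.2 ∧ p.2 ≤ msg.length := by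
  induction fuel generalizing i with
  | zero => simp [wordsFrom]
  | succ fuel ih =>
    intro p hp
    rw [wordsFrom] at hp
    by_cases h : i < msg.length
    · rw [dif_pos h] at hp
      by_cases hsp : msg[i] = ' '
      · rw [if_pos hsp] at hp
        have := ih (i + 1) p hp; omega
      · rw [if_neg hsp] at hp
        rcases List.mem_cons.1 hp with rfl | hp
        · exact ⟨le_refl _, lt_wordEnd msg fuel i h hsp, wordEnd_le msg (fuel + 1) i (by omega)⟩
        · have h2 := ih (wordEnd msg (fuel + 1) i) p hp
          have h3 := le_wordEnd msg (fuel + 1) i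
          exact ⟨by omega, h2.2.1, h2.2.2⟩
    · rw [dif_neg h] at hp; simp at hp

theorem loopA_eq (msg : List Char) (cover : List Int) (fuel i : Nat)
    (plain : PySem.Set String) (revealed : List (List String)) :
    loopA msg cover fuel i plain revealed =
      (wordsFrom msg fuel i).foldl
        (fun st p =>
          (if lastOf cover p = -1 then PySem.Set.add st.1 (wordOf msg p) else st.1,
           if lastOf cover p = -1 then st.2
           else PySem.List.pySetD st.2 (lastOf cover p)
                  (PySem.List.pyGetD st.2 (lastOf cover p) [] ++ [wordOf msg p])))
        (plain, revealed) := by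
  induction fuel generalizing i plain revealed with
  | zero => simp [loopA, wordsFrom]
  | succ fuel ih =>
    rw [loopA, wordsFrom]
    by_cases h : i < msg.length
    · by_cases hsp : msg[i] = ' '
      · simpa only [dif_pos h, if_pos hsp] using ih (i + 1) plain revealed
      · simp only [dif_pos h, if_neg hsp, List.foldl_cons]
        by_cases hl : lastOf cover (i, wordEnd msg (fuel + 1) i) = -1
        · have hl' := hl
          simp only [lastOf] at hl'
          rw [if_pos hl, if_pos hl, if_pos hl']
          exact ih _ _ _
        · have hl' := hl
          simp only [lastOf] at hl'
          rw [if_neg hl, if_neg hl, if_neg hl']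
          exact ih _ _ _
    · simp only [dif_neg h, List.foldl_nil]

theorem loopB_eq (msg : List Char) (rs : List (Int × Int)) (fuel i : Nat)
    (plain covered : PySem.Set String) :
    loopB msg rs fuel i plain covered =
      (wordsFrom msg fuel i).foldl
        (fun st p =>
          (if covOf rs p then st.1 else PySem.Set.add st.1 (wordOf msg p),
           if covOf rs p then PySem.Set.add st.2 (wordOf msg p) else st.2))
        (plain, covered) := by
  induction fuel generalizing i plain covered with
  | zero => simp [loopB, wordsFrom]
  | succ fuel ih =>
    rw [loopB, wordsFrom]
    by_cases h : i < msg.length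
    · by_cases hsp : msg[i] = ' '
      · simpa only [dif_pos h, if_pos hsp] using ih (i + 1) plain covered
      · simp only [dif_pos h, if_neg hsp, List.foldl_cons]
        by_cases hc : covOf rs (i, wordEnd msg (fuel + 1) i) = true
        · have hc' := hc
          simp only [covOf] at hc'
          rw [if_pos hc, if_pos hc, if_pos hc']
          exact ih _ _ _
        · have hc' := hc
          simp only [covOf] at hc'
          rw [if_neg hc, if_neg hc, if_neg hc']
          exact ih _ _ _
    · simp only [dif_neg h, List.foldl_nil]

-- ---- cover characterization ----

theorem length_foldl_pySetD (l : List Int) (idx : Int) (c : List Int) :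
    (l.foldl (fun c i => PySem.List.pySetD c i idx) c).length = c.length := by
  induction l generalizing c with
  | nil => rfl
  | cons q l ih => simp [ih, PySem.List.length_pySetD]

theorem foldl_pySetD_interval (e idx : Int) (fuel : Nat) :
    ∀ (s : Int) (c : List Int), 0 ≤ s → e < (c.length : Int) → (e + 1 - s).toNat ≤ fuel →
    ∀ p : Nat, p < c.length →
      ((PySem.List.pyRange s (e + 1) 1).foldl (fun c i => PySem.List.pySetD c i idx) c).getD p (-1)
        = if s ≤ (p : Int) ∧ (p : Int) ≤ e then idx else c.getD p (-1) := by
  induction fuel with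
  | zero =>
    intro s c hs he hfuel p hp
    rw [PySem.List.pyRange_one_eq_nil (by omega), List.foldl_nil, if_neg (by omega)]
  | succ fuel ih =>
    intro s c hs he hfuel p hp
    by_cases hse : s ≤ e
    · rw [PySem.List.pyRange_one_cons (by omega : s < e + 1), List.foldl_cons,
        PySem.List.pySetD_of_nonneg c idx hs]
      rw [ih (s + 1) (c.set s.toNat idx) (by omega) (by simpa using he) (by omega) p
        (by simpa using hp)]
      by_cases h1 : s + 1 ≤ (p : Int) ∧ (p : Int) ≤ e
      · rw [if_pos h1, if_pos ⟨by omega, h1.2⟩]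
      · rw [if_neg h1]
        by_cases h2 : s ≤ (p : Int) ∧ (p : Int) ≤ e
        · rw [if_pos h2]
          have hps : p = s.toNat := by omega
          subst hps
          simp [List.getD_eq_getElem?_getD, hp]
        · rw [if_neg h2]
          have hne : s.toNat ≠ p := by omega
          simp [List.getD_eq_getElem?_getD, hne]
    · rw [PySem.List.pyRange_one_eq_nil (by omega), List.foldl_nil, if_neg (by omega)]

theorem buildCoverAux (rs : List (Int × Int)) (k : Nat) (c : List Int)
    (hPre : ∀ se ∈ rs, se.1 ≤ se.2 → 0 ≤ se.1 ∧ se.2 < (c.length : Int)) :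
    ((PySem.List.enumerate rs (k : Int)).foldl
        (fun c pr =>
          (PySem.List.pyRange pr.2.1 (pr.2.2 + 1) 1).foldl
            (fun c i => PySem.List.pySetD c i pr.1) c) c).length = c.length ∧
    ∀ p : Nat, p < c.length →
      (if ∃ se ∈ rs, se.1 ≤ (p : Int) ∧ (p : Int) ≤ se.2
       then (k : Int) ≤ ((PySem.List.enumerate rs (k : Int)).foldl
              (fun c pr =>
                (PySem.List.pyRange pr.2.1 (pr.2.2 + 1) 1).foldl
                  (fun c i => PySem.List.pySetD c i pr.1) c) c).getD p (-1) ∧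
            ((PySem.List.enumerate rs (k : Int)).foldl
              (fun c pr =>
                (PySem.List.pyRange pr.2.1 (pr.2.2 + 1) 1).foldl
                  (fun c i => PySem.List.pySetD c i pr.1) c) c).getD p (-1) < (k : Int) + rs.length
       else ((PySem.List.enumerate rs (k : Int)).foldl
              (fun c pr =>
                (PySem.List.pyRange pr.2.1 (pr.2.2 + 1) 1).foldl
                  (fun c i => PySem.List.pySetD c i pr.1) c) c).getD p (-1) = c.getD p (-1)) := by
  induction rs generalizing k c with
  | nil =>
    refine ⟨by rw [PySem.List.enumerate_nil, List.foldl_nil], ?_⟩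
    intro p hp
    rw [PySem.List.enumerate_nil, List.foldl_nil, if_neg (by simp)]
  | cons se rest ih =>
    rw [PySem.List.enumerate_cons, List.foldl_cons]
    have hcast : (k : Int) + 1 = ((k + 1 : Nat) : Int) := by push_cast; ring
    rw [hcast]
    dsimp only
    set c1 := List.foldl (fun c i => PySem.List.pySetD c i (k : Int)) c
      (PySem.List.pyRange se.1 (se.2 + 1)) with hc1
    have hlen1 : c1.length = c.length := length_foldl_pySetD _ _ _
    have hPre' : ∀ se' ∈ rest, se'.1 ≤ se'.2 → 0 ≤ se'.1 ∧ se'.2 < (c1.length : Int) := by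
      intro se' h1 h2
      rw [hlen1]
      exact hPre se' (List.mem_cons_of_mem _ h1) h2
    obtain ⟨ihlen, ihval⟩ := ih (k + 1) c1 hPre'
    refine ⟨by rw [ihlen, hlen1], ?_⟩
    intro p hp
    have hp1 : p < c1.length := by omega
    have hval := ihval p hp1
    have hc1getD : c1.getD p (-1) =
        if se.1 ≤ (p : Int) ∧ (p : Int) ≤ se.2 then (k : Int) else c.getD p (-1) := by
      by_cases hse : se.1 ≤ se.2
      · obtain ⟨h0, hn⟩ := hPre se List.mem_cons_self hse
        rw [hc1]
        exact foldl_pySetD_interval se.2 (k : Int) (se.2 + 1 - se.1).toNat se.1 c h0 hn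
          (le_refl _) p hp
      · rw [hc1, PySem.List.pyRange_one_eq_nil (by omega), List.foldl_nil, if_neg (by omega)]
    by_cases hrest : ∃ se' ∈ rest, se'.1 ≤ (p : Int) ∧ (p : Int) ≤ se'.2
    · rw [if_pos hrest] at hval
      rw [if_pos ((List.exists_mem_cons_iff _ se rest).2 (Or.inr hrest))]
      push_cast [List.length_cons] at hval ⊢
      omega
    · rw [if_neg hrest] at hval
      by_cases hcov : se.1 ≤ (p : Int) ∧ (p : Int) ≤ se.2
      · rw [if_pos ((List.exists_mem_cons_iff _ se rest).2 (Or.inl hcov))]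
        rw [hval, hc1getD, if_pos hcov]
        push_cast [List.length_cons]
        omega
      · rw [if_neg (fun hcontra => by
            rcases (List.exists_mem_cons_iff _ se rest).1 hcontra with h | h
            · exact hcov h
            · exact hrest h)]
        rw [hval, hc1getD, if_neg hcov]

theorem foldl_max_neg_one (f : Int → Int) (M : Int) (l : List Int)
    (hf : ∀ q ∈ l, f q = -1 ∨ (0 ≤ f q ∧ f q < M)) :
    ∀ acc : Int, acc = -1 ∨ (0 ≤ acc ∧ acc < M) →
      ((l.foldl (fun a q => if f q ≠ -1 then max a (f q) else a) acc = -1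
          ↔ (acc = -1 ∧ ∀ q ∈ l, f q = -1)) ∧
       (l.foldl (fun a q => if f q ≠ -1 then max a (f q) else a) acc = -1 ∨
          (0 ≤ l.foldl (fun a q => if f q ≠ -1 then max a (f q) else a) acc ∧
           l.foldl (fun a q => if f q ≠ -1 then max a (f q) else a) acc < M))) := by
  induction l with
  | nil =>
    intro acc hacc
    simp only [List.foldl_nil]
    exact ⟨⟨fun h => ⟨h, by simp⟩, fun h => h.1⟩, hacc⟩
  | cons q l ih =>
    intro acc hacc
    rcases hf q List.mem_cons_self with hq | hq
    · rw [List.foldl_cons, if_neg (by simp [hq])]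
      have h2 := ih (fun r hr => hf r (List.mem_cons_of_mem q hr)) acc hacc
      refine ⟨?_, h2.2⟩
      rw [h2.1]
      constructor
      · rintro ⟨h1, h3⟩
        refine ⟨h1, fun r hr => ?_⟩
        rcases List.mem_cons.1 hr with rfl | hr
        · exact hq
        · exact h3 r hr
      · rintro ⟨h1, h3⟩
        exact ⟨h1, fun r hr => h3 r (List.mem_cons_of_mem q hr)⟩
    · have hne : f q ≠ -1 := by omega
      rw [List.foldl_cons, if_pos hne]
      have haccM : acc < M := by rcases hacc with h | h <;> omega
      have hacc' : max acc (f q) = -1 ∨ (0 ≤ max acc (f q) ∧ max acc (f q) < M) :=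
        Or.inr ⟨le_trans hq.1 (le_max_right _ _), max_lt haccM hq.2⟩
      have h2 := ih (fun r hr => hf r (List.mem_cons_of_mem q hr)) _ hacc'
      refine ⟨?_, h2.2⟩
      rw [h2.1]
      constructor
      · rintro ⟨h1, _⟩
        have := le_trans hq.1 (le_max_right acc (f q))
        omega
      · rintro ⟨h1, h3⟩
        exact absurd (h3 q List.mem_cons_self) hne

-- under Pre_, for an in-bounds word span: A's last-index test agrees with B's intersection
-- test, and when covered the last index lies in [0, m)
theorem lastOf_spec (n : Nat) (rs : List (Int × Int))
    (hPre : ∀ se ∈ rs, se.1 ≤ se.2 → 0 ≤ se.1 ∧ se.2 < (n : Int))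
    (p : Nat × Nat) (hab : p.1 < p.2) (hb : p.2 ≤ n) :
    (lastOf (buildCover n rs) p = -1 ↔ covOf rs p = false) ∧
    (lastOf (buildCover n rs) p = -1 ∨
      (0 ≤ lastOf (buildCover n rs) p ∧ lastOf (buildCover n rs) p < (rs.length : Int))) := by
  have hbc : buildCover n rs =
      (PySem.List.enumerate rs ((0 : Nat) : Int)).foldl
        (fun c pr =>
          (PySem.List.pyRange pr.2.1 (pr.2.2 + 1) 1).foldl
            (fun c i => PySem.List.pySetD c i pr.1) c)
        (List.replicate n (-1)) := by
    unfold buildCover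
    norm_num
  obtain ⟨hlenAux, hvalAux⟩ := buildCoverAux rs 0 (List.replicate n (-1)) (by simpa using hPre)
  rw [← hbc] at hlenAux hvalAux
  have hlen : (buildCover n rs).length = n := by rw [hlenAux]; simp
  have hchar : ∀ q : Nat, q < n →
      (((buildCover n rs).getD q (-1) = -1 ↔
        ¬ ∃ se ∈ rs, se.1 ≤ (q : Int) ∧ (q : Int) ≤ se.2) ∧
      ((buildCover n rs).getD q (-1) = -1 ∨
        (0 ≤ (buildCover n rs).getD q (-1) ∧
          (buildCover n rs).getD q (-1) < (rs.length : Int)))) := by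
    intro q hq
    have h2 := hvalAux q (by simpa using hq)
    by_cases hex : ∃ se ∈ rs, se.1 ≤ (q : Int) ∧ (q : Int) ≤ se.2
    · rw [if_pos hex] at h2
      push_cast at h2
      refine ⟨⟨fun h => ?_, fun h => absurd hex h⟩, Or.inr ⟨by omega, by omega⟩⟩
      omega
    · rw [if_neg hex] at h2
      have hrep : (List.replicate n (-1 : Int)).getD q (-1) = -1 := by
        rw [List.getD_eq_getElem?_getD, List.getElem?_replicate]
        split <;> rfl
      rw [hrep] at h2
      exact ⟨⟨fun _ => hex, fun _ => h2⟩, Or.inl h2⟩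
  have hlt_iff : ∀ q : Int, (p.1 : Int) ≤ q → q < (p.2 : Int) →
      ((PySem.List.pyGetD (buildCover n rs) q (-1) = -1 ↔
        ¬ ∃ se ∈ rs, se.1 ≤ q ∧ q ≤ se.2) ∧
      (PySem.List.pyGetD (buildCover n rs) q (-1) = -1 ∨
        (0 ≤ PySem.List.pyGetD (buildCover n rs) q (-1) ∧
          PySem.List.pyGetD (buildCover n rs) q (-1) < (rs.length : Int)))) := by
    intro q h1 h2
    have h0q : 0 ≤ q := le_trans (Int.natCast_nonneg p.1) h1
    have hqn : q.toNat < n := by omega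
    have hgetd : PySem.List.pyGetD (buildCover n rs) q (-1) =
        (buildCover n rs).getD q.toNat (-1) := by
      rw [PySem.List.pyGetD_eq_getElem _ _ h0q (by rw [hlen]; omega),
        List.getD_eq_getElem _ _ (by rw [hlen]; exact hqn)]
    have hc := hchar q.toNat hqn
    rw [Int.toNat_of_nonneg h0q] at hc
    rw [hgetd]
    exact hc
  have hf : ∀ q ∈ PySem.List.pyRange (p.1 : Int) (p.2 : Int) 1,
      PySem.List.pyGetD (buildCover n rs) q (-1) = -1 ∨
        (0 ≤ PySem.List.pyGetD (buildCover n rs) q (-1) ∧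
          PySem.List.pyGetD (buildCover n rs) q (-1) < (rs.length : Int)) := by
    intro q hq
    rw [PySem.List.mem_pyRange_one] at hq
    exact (hlt_iff q hq.1 hq.2).2
  have hmax := foldl_max_neg_one (fun q => PySem.List.pyGetD (buildCover n rs) q (-1))
      (rs.length) (PySem.List.pyRange (p.1 : Int) (p.2 : Int) 1) hf (-1) (Or.inl rfl)
  have hlast : lastOf (buildCover n rs) p =
      (PySem.List.pyRange (p.1 : Int) (p.2 : Int) 1).foldl
        (fun acc q =>
          if PySem.List.pyGetD (buildCover n rs) q (-1) ≠ -1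
          then max acc (PySem.List.pyGetD (buildCover n rs) q (-1)) else acc) (-1) := by
    unfold lastOf
    rw [show ((p.2 : Int) - 1) + 1 = (p.2 : Int) by ring]
  constructor
  · rw [hlast, hmax.1, and_iff_right rfl]
    rw [show (covOf rs p = false) ↔
        ∀ se ∈ rs, ¬ (max se.1 (p.1 : Int) ≤ min se.2 ((p.2 : Int) - 1)) from by
      simp [covOf, List.any_eq_false]]
    constructor
    · intro hall se hse hcontra
      have hq1 : (p.1 : Int) ≤ max se.1 (p.1 : Int) := le_max_right _ _
      have hq2 : max se.1 (p.1 : Int) < (p.2 : Int) := by omega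
      have hmem := hall (max se.1 (p.1 : Int)) (PySem.List.mem_pyRange_one.2 ⟨hq1, hq2⟩)
      rw [(hlt_iff _ hq1 hq2).1] at hmem
      exact hmem ⟨se, hse, le_max_left _ _, by omega⟩
    · intro hall q hq
      rw [PySem.List.mem_pyRange_one] at hq
      rw [(hlt_iff q hq.1 hq.2).1]
      rintro ⟨se, hse, hc1, hc2⟩
      exact hall se hse (by omega)
  · rw [hlast]
    exact hmax.2

-- ---- counting ----

theorem flatten_set_perm (w : String) (rv : List (List String)) (k : Nat)
    (hk : k < rv.length) :
    (rv.set k (rv[k] ++ [w])).flatten.Perm (rv.flatten ++ [w]) := by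
  induction rv generalizing k with
  | nil => simp at hk
  | cons y ys ih =>
    cases k with
    | zero =>
      simp only [List.set_cons_zero, List.flatten_cons, List.getElem_cons_zero]
      rw [List.perm_iff_count]
      intro x
      simp only [List.count_append]
      omega
    | succ k =>
      simp only [List.set_cons_succ, List.flatten_cons, List.getElem_cons_succ]
      have h1 := (ih k (by simpa using hk)).append_left y
      have h2 : y ++ (ys.flatten ++ [w]) = (y ++ ys.flatten) ++ [w] := by
        rw [List.append_assoc]
      rw [h2] at h1
      exact h1

theorem flatten_pySetD_perm (rv : List (List String)) (t : Int) (w : String)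
    (h0 : 0 ≤ t) (ht : t < (rv.length : Int)) :
    (PySem.List.pySetD rv t (PySem.List.pyGetD rv t [] ++ [w])).flatten.Perm
      (rv.flatten ++ [w]) := by
  have hk : t.toNat < rv.length := by omega
  rw [PySem.List.pySetD_of_nonneg rv _ h0,
      PySem.List.pyGetD_eq_getElem rv [] h0 (by exact_mod_cast ht)]
  exact flatten_set_perm w rv t.toNat hk

theorem revealed_fold_spec (cover : List Int) (msg : List Char) (m : Nat)
    (L : List (Nat × Nat))
    (hL : ∀ p ∈ L, lastOf cover p = -1 ∨
            (0 ≤ lastOf cover p ∧ lastOf cover p < (m : Int))) :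
    ∀ rv : List (List String), rv.length = m →
      (L.foldl
        (fun rv p =>
          if lastOf cover p = -1 then rv
          else PySem.List.pySetD rv (lastOf cover p)
                 (PySem.List.pyGetD rv (lastOf cover p) [] ++ [wordOf msg p])) rv).length = m ∧
      (L.foldl
        (fun rv p =>
          if lastOf cover p = -1 then rv
          else PySem.List.pySetD rv (lastOf cover p)
                 (PySem.List.pyGetD rv (lastOf cover p) [] ++ [wordOf msg p])) rv).flatten.Perm
        (rv.flatten ++ (L.filter (fun p => !(lastOf cover p == -1))).map (wordOf msg)) := by
  induction L with
  | nil =>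
    intro rv hrv
    exact ⟨hrv, by simp⟩
  | cons p rest ih =>
    intro rv hrv
    rcases hL p List.mem_cons_self with hl | hb
    · rw [List.foldl_cons, if_pos hl, List.filter_cons_of_neg (by simp [hl])]
      exact ih (fun q hq => hL q (List.mem_cons_of_mem _ hq)) rv hrv
    · have hl : ¬ lastOf cover p = -1 := by omega
      rw [List.foldl_cons, if_neg hl, List.filter_cons_of_pos (by simp [hl])]
      have hlen' : (PySem.List.pySetD rv (lastOf cover p)
          (PySem.List.pyGetD rv (lastOf cover p) [] ++ [wordOf msg p])).length = m := by
        rw [PySem.List.length_pySetD]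
        exact hrv
      obtain ⟨ihl, ihp⟩ := ih (fun q hq => hL q (List.mem_cons_of_mem _ hq)) _ hlen'
      refine ⟨ihl, ?_⟩
      have hperm := flatten_pySetD_perm rv (lastOf cover p) (wordOf msg p) hb.1
        (by rw [hrv]; exact hb.2)
      refine ihp.trans ?_
      have hstep := hperm.append_right
        ((rest.filter (fun q => !(lastOf cover q == -1))).map (wordOf msg))
      refine hstep.trans ?_
      rw [List.append_assoc, List.singleton_append, List.map_cons]

theorem countLoop (plain : PySem.Set String) (L : List String) :
    ∀ (seen : PySem.Set String) (ans : Int),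
      (L.foldl
        (fun st w =>
          (if w ∉ plain ∧ w ∉ st.2 then st.1 + 1 else st.1, PySem.Set.add st.2 w))
        (ans, seen)).1
      = ans + (((PySem.Set.ofList L).filter
          (fun w => decide (w ∉ plain) && decide (w ∉ seen))).length : Int) := by
  induction L with
  | nil =>
    intro seen ans
    simp [PySem.Set.ofList]
  | cons w rest ih =>
    intro seen ans
    rw [List.foldl_cons, ih (PySem.Set.add seen w), PySem.Set.ofList_cons, List.filter_cons]
    have hdiscard : ((PySem.Set.ofList rest).discard w).filter
          (fun x => decide (x ∉ plain) && decide (x ∉ seen))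
        = (PySem.Set.ofList rest).filter
          (fun x => decide (x ∉ plain) && decide (x ∉ PySem.Set.add seen w)) := by
      simp only [PySem.Set.discard, List.filter_filter]
      apply List.filter_congr
      intro x hx
      by_cases h1 : x = w
      · simp [h1, PySem.Set.mem_add]
      · simp [h1, PySem.Set.mem_add]
    rw [hdiscard]
    by_cases hcond : w ∉ plain ∧ w ∉ seen
    · rw [if_pos (by simp [hcond.1, hcond.2] : (decide (w ∉ plain) && decide (w ∉ seen)) = true)]
      simp only [if_pos hcond, List.length_cons]
      push_cast
      ring
    · rw [if_neg hcond, if_neg (show ¬((decide (w ∉ plain) && decide (w ∉ seen)) = true) by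
        simp only [Bool.and_eq_true, decide_eq_true_eq]
        intro h
        exact hcond ⟨h.1, h.2⟩)]

theorem count_distinct_perm (L L' : List String) (h : L.Perm L') (P : String → Bool) :
    ((PySem.Set.ofList L).filter P).length = ((PySem.Set.ofList L').filter P).length := by
  have hp : (PySem.Set.ofList L).Perm (PySem.Set.ofList L') :=
    (List.perm_ext_iff_of_nodup (PySem.Set.nodup_ofList L) (PySem.Set.nodup_ofList L')).2
      (fun a => by simp [PySem.Set.mem_ofList, h.mem_iff])
  exact (hp.filter P).length_eq

-- ===== VERDICT (by name: the statement is the Claim_ definition above) =====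
theorem solution_spec : Claim_equal_solution := by
  intro message rs _hdom hpre
  unfold Spec_solution
  simp only [solution, solution_alt]
  set msg := message.toList with hmsg
  have hpre' : ∀ se ∈ rs, se.1 ≤ se.2 → 0 ≤ se.1 ∧ se.2 < (msg.length : Int) := by
    intro se h1 h2
    have h3 := hpre se h1 h2
    rw [hmsg, String.length_toList]
    exact h3
  rw [loopA_eq, loopB_eq]
  rw [PySem.List.foldl_prod_mk
      (f := fun pl p => if lastOf (buildCover msg.length rs) p = -1
              then PySem.Set.add pl (wordOf msg p) else pl)
      (g := fun rv p => if lastOf (buildCover msg.length rs) p = -1 then rv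
              else PySem.List.pySetD rv (lastOf (buildCover msg.length rs) p)
                (PySem.List.pyGetD rv (lastOf (buildCover msg.length rs) p) []
                  ++ [wordOf msg p]))]
  rw [PySem.List.foldl_prod_mk
      (f := fun pl p => if covOf rs p then pl else PySem.Set.add pl (wordOf msg p))
      (g := fun cv p => if covOf rs p then PySem.Set.add cv (wordOf msg p) else cv)]
  dsimp only
  set S := wordsFrom msg msg.length 0 with hS
  set cover := buildCover msg.length rs with hcover
  have hbounds := mem_wordsFrom_bounds msg msg.length 0
  rw [← hS] at hbounds
  have hspec : ∀ p ∈ S, (lastOf cover p = -1 ↔ covOf rs p = false) ∧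
      (lastOf cover p = -1 ∨
        (0 ≤ lastOf cover p ∧ lastOf cover p < (rs.length : Int))) := by
    intro p hp
    exact lastOf_spec msg.length rs hpre' p (hbounds p hp).2.1 (hbounds p hp).2.2
  have hnotcond : ∀ p ∈ S, covOf rs p = true → ¬ lastOf cover p = -1 := by
    intro p hp hc hl
    have := ((hspec p hp).1).1 hl
    rw [this] at hc
    exact Bool.false_ne_true hc
  -- the two plain-word sets coincide
  have hplain : S.foldl
        (fun pl p => if lastOf cover p = -1 then PySem.Set.add pl (wordOf msg p) else pl)
        PySem.Set.empty
      = S.foldl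
        (fun pl p => if covOf rs p then pl else PySem.Set.add pl (wordOf msg p))
        PySem.Set.empty := by
    apply PySem.List.foldl_congr_mem
    intro acc p hp
    by_cases hc : covOf rs p
    · rw [if_neg (hnotcond p hp hc), if_pos hc]
    · have hcf : covOf rs p = false := by simpa using hc
      rw [if_pos (((hspec p hp).1).2 hcf), if_neg hc]
  rw [hplain]
  set PB := S.foldl
    (fun pl p => if covOf rs p then pl else PySem.Set.add pl (wordOf msg p))
    PySem.Set.empty with hPB
  -- B's covered set is the distinct covered words
  have hCV : S.foldl
        (fun cv p => if covOf rs p then PySem.Set.add cv (wordOf msg p) else cv)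
        PySem.Set.empty
      = PySem.Set.ofList ((S.filter (fun p => covOf rs p)).map (wordOf msg)) := by
    rw [PySem.List.foldl_if_eq_foldl_filter (p := fun p => covOf rs p)
        (f := fun cv p => PySem.Set.add cv (wordOf msg p)),
      ← PySem.Set.update_map_eq_foldl_add, PySem.Set.update_empty]
  rw [hCV]
  -- A's buckets flatten to a permutation of the covered words
  obtain ⟨hRVlen, hRVperm⟩ := revealed_fold_spec cover msg rs.length S
    (fun p hp => (hspec p hp).2) (List.replicate rs.length []) (by simp)
  set RV := S.foldl
    (fun rv p => if lastOf cover p = -1 then rv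
      else PySem.List.pySetD rv (lastOf cover p)
        (PySem.List.pyGetD rv (lastOf cover p) [] ++ [wordOf msg p]))
    (List.replicate rs.length []) with hRV
  rw [List.flatten_replicate_nil, List.nil_append] at hRVperm
  have hfiltereq : S.filter (fun p => !(lastOf cover p == -1))
      = S.filter (fun p => covOf rs p) := by
    apply List.filter_congr
    intro p hp
    by_cases hc : covOf rs p
    · simp [hnotcond p hp hc, hc]
    · have hcf : covOf rs p = false := by simpa using hc
      simp [((hspec p hp).1).2 hcf, hcf]
  rw [hfiltereq] at hRVperm
  -- A's second phase counts the distinct revealed words outside plain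
  rw [show ((rs.length : Int)) = ((RV.length : Int)) by rw [hRVlen]]
  rw [PySem.List.foldl_pyRange_zero_pyGetD' RV []
      (fun st bucket => bucket.foldl
        (fun st word =>
          (if word ∉ PB ∧ word ∉ st.2 then st.1 + 1 else st.1, PySem.Set.add st.2 word)) st)
      ((0 : Int), (PySem.Set.empty : PySem.Set String))]
  rw [← List.foldl_flatten]
  rw [countLoop PB RV.flatten PySem.Set.empty 0]
  rw [count_distinct_perm RV.flatten _ hRVperm]
  simp only [PySem.Set.diff, PySem.Set.len]
  rw [show (PySem.Set.ofList ((S.filter (fun p => covOf rs p)).map (wordOf msg))).filter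
        (fun w => decide (w ∉ PB) && decide (w ∉ (PySem.Set.empty : PySem.Set String)))
      = (PySem.Set.ofList ((S.filter (fun p => covOf rs p)).map (wordOf msg))).filter
        (fun x => !(PySem.Set.contains PB x)) from by
    apply List.filter_congr
    intro x _
    by_cases hx : x ∈ PB
    · have h1 : PySem.Set.contains PB x = true := (PySem.Set.contains_iff PB x).2 hx
      simp [hx, PySem.Set.empty]
    · have h1 : PySem.Set.contains PB x = false := by
        rcases Bool.eq_false_or_eq_true (PySem.Set.contains PB x) with h | h
        · exact absurd ((PySem.Set.contains_iff PB x).1 h) hx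
        · exact h
      simp [hx, PySem.Set.empty]]
  omega
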